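-- pv_equiv track=rewrite | github.com/KrasherPlay/KPZ | Lab7/Lab7TupisMaksym.py | generate_shaded_array
-- ===== SOURCE A (Python) =====
-- def generate_shaded_array(size: int, fill_char: str) -> list[list[str]]:
--     """
--     Генерує "зубчатий" масив у формі перевернутого трикутника.
--
--     Args:
--         size (int): Розмір матриці.
--         fill_char (str): Символ для заповнення.
--
--     Returns:
--         list[list[str]]: Згенерований зубчатий масив.
--     """
--     jagged_array = []
--     mid_row = (size + 1) // 2
--     for i in range(size):
--         if i < mid_row:
--             count = size - 2 * i
--             row = [fill_char] * count
--             jagged_array.append(row)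
--         else:
--             jagged_array.append([])
--     return jagged_array
-- ===== SOURCE B (Python) =====
-- def generate_shaded_array(size: int, fill_char: str) -> list[list[str]]:
--     # Recursive "peel the outer layer": the triangle of size n is its widest row,
--     # then the whole triangle of size n-2, then one trailing empty row.
--     if size <= 0:
--         return []
--     if size == 1:
--         return [[fill_char]]
--     return [[fill_char] * size] + generate_shaded_array(size - 2, fill_char) + [[]]
-- ===== Notes on version B (the rewrite author's own statement) =====
-- stated objective: alternative
-- what changed: B replaces A's indexed for-loop with a mid_row branch by structural recursion that peels one layer at a time: the triangle of size n is the widest row, then the whole triangle of size n-2, then one trailing empty row.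
import Mathlib
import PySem

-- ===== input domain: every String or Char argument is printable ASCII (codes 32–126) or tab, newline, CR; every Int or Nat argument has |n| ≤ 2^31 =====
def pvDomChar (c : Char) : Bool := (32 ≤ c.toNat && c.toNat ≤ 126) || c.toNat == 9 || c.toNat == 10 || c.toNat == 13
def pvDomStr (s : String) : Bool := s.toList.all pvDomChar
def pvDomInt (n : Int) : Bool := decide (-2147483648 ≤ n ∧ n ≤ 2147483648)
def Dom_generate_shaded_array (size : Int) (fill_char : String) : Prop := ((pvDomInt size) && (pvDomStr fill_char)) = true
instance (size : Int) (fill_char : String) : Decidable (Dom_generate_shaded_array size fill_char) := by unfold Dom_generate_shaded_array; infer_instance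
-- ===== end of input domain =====

-- B replaces A's indexed loop with structural recursion peeling one layer at a time:
-- triangle(n) = widest row ++ triangle(n-2) ++ one trailing empty row; same cost.

-- ===== PORT A =====
def generate_shaded_array (size : Int) (fill_char : String) : List (List String) :=
  -- mid_row = (size + 1) // 2, inlined at its single use
  (PySem.List.pyRange 0 size 1).foldl (fun jagged_array i =>
    if i < PySem.Int.floordiv (size + 1) 2 then
      jagged_array ++ [List.replicate (size - 2 * i).toNat fill_char]
    else
      jagged_array ++ [[]]) []

-- ===== PORT B =====
def generate_shaded_array_alt (size : Int) (fill_char : String) : List (List String) :=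
  if size ≤ 0 then []
  else if size = 1 then [[fill_char]]
  else List.replicate size.toNat fill_char ::
       (generate_shaded_array_alt (size - 2) fill_char ++ [[]])
termination_by size.toNat
decreasing_by omega

-- ===== PRECONDITION & SPEC =====
def Spec_generate_shaded_array (size : Int) (fill_char : String) (out : List (List String)) : Prop := out = generate_shaded_array_alt size fill_char
instance (size : Int) (fill_char : String) (out : List (List String)) : Decidable (Spec_generate_shaded_array size fill_char out) := by unfold Spec_generate_shaded_array; infer_instance

-- ===== CLAIM (what is proved, stated in full; the proofs are below) =====
def Claim_equal_generate_shaded_array : Prop := ∀ (size : Int) (fill_char : String), Dom_generate_shaded_array size fill_char → Spec_generate_shaded_array size fill_char (generate_shaded_array size fill_char)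

-- ===== LEMMAS AND PROOFS =====

-- closed form shared by the two proofs: widths size, size-2, … then empty rows to size rows
def pvClosed (n : Nat) (fill_char : String) : List (List String) :=
  (List.range ((n + 1) / 2)).map (fun j => List.replicate (n - 2 * j) fill_char)
    ++ List.replicate (n - (n + 1) / 2) ([] : List String)

theorem alt_eq_closed (size : Int) (fill_char : String) :
    generate_shaded_array_alt size fill_char = pvClosed size.toNat fill_char := by
  by_cases h0 : size ≤ 0
  · rw [generate_shaded_array_alt, if_pos h0]
    have : size.toNat = 0 := by omega
    simp [pvClosed, this]
  · by_cases h1 : size = 1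
    · subst h1
      rw [generate_shaded_array_alt]
      simp [pvClosed, List.range_succ]
    · rw [generate_shaded_array_alt, if_neg h0, if_neg h1,
        alt_eq_closed (size - 2) fill_char]
      have hn : 2 ≤ size := by omega
      set n := size.toNat with hndef
      have hm : (size - 2).toNat = n - 2 := by omega
      have hge : 2 ≤ n := by omega
      rw [hm]
      unfold pvClosed
      have hk : (n + 1) / 2 = (n - 2 + 1) / 2 + 1 := by omega
      rw [hk, List.range_succ_eq_map]
      simp only [List.map_cons, List.map_map, Nat.mul_zero, Nat.sub_zero,
        List.cons_append]
      congr 1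
      have hrep : n - ((n - 2 + 1) / 2 + 1) = (n - 2 - (n - 2 + 1) / 2) + 1 := by omega
      rw [hrep, List.replicate_succ', List.append_assoc]
      congr 1
      apply List.map_congr_left
      intro j _
      simp only [Function.comp_apply]
      congr 1
      omega
termination_by size.toNat
decreasing_by omega

theorem a_eq_closed (size : Int) (fill_char : String) :
    generate_shaded_array size fill_char = pvClosed size.toNat fill_char := by
  unfold generate_shaded_array
  have hfun : (fun (a : List (List String)) (i : Int) =>
      if i < PySem.Int.floordiv (size + 1) 2 then
        a ++ [List.replicate (size - 2 * i).toNat fill_char]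
      else a ++ [[]]) =
      (fun a i => a ++ [if i < PySem.Int.floordiv (size + 1) 2 then
        List.replicate (size - 2 * i).toNat fill_char else []]) := by
    funext a i; split <;> rfl
  rw [hfun, PySem.List.foldl_append_singleton_eq_map, PySem.List.pyRange_one]
  have hm : PySem.Int.floordiv (size + 1) 2 = (size + 1) / 2 :=
    PySem.Int.floordiv_eq_ediv_of_pos (by omega)
  simp only [hm, List.map_map, List.nil_append]
  unfold pvClosed
  apply List.ext_getElem
  · simp only [List.length_map, List.length_range, List.length_append,
      List.length_replicate]
    omega
  · intro i hi1 hi2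
    simp only [List.length_map, List.length_range] at hi1
    simp only [List.getElem_map, List.getElem_range, Function.comp_apply]
    by_cases hi : i < (size.toNat + 1) / 2
    · rw [List.getElem_append_left
        (by simp only [List.length_map, List.length_range]; exact hi)]
      simp only [List.getElem_map, List.getElem_range]
      rw [if_pos (by omega)]
      congr 1
      omega
    · rw [List.getElem_append_right
        (by simp only [List.length_map, List.length_range]; omega)]
      simp only [List.getElem_replicate]
      rw [if_neg (by omega)]

-- ===== VERDICT (by name: the statement is the Claim_ definition above) =====
theorem generate_shaded_array_spec : Claim_equal_generate_shaded_array := by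
  intro size fill_char _
  unfold Spec_generate_shaded_array
  rw [a_eq_closed, alt_eq_closed]
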